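-- pv_equiv track=rewrite | github.com/so1ken/Python-algorithms | task 4/task 4.py | count_ap_subarrays
-- ===== SOURCE A (Python) =====
-- def count_ap_subarrays(array):
--     n = len(array)
--     ans = 0
--
--     for l in range(n):
--         for r in range(l + 2, n):
--             found = False
--             for i in range(l, r - 1):
--                 for j in range(i + 1, r):
--                     for k in range(j + 1, r + 1):
--                         if array[j] * 2 == array[i] + array[k]:
--                             found = True
--                             break
--                     if found:
--                         break
--                 if found:
--                     break
--             if found:
--                 ans += n - r
--                 break
--     return ans
-- ===== SOURCE B (Python) =====
-- def count_ap_subarrays(array):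
--     # Per left end l, scan r upward; a new minimal window must contain a 3-term AP
--     # whose last element is array[r], detected in O(n) with a prefix value set.
--     n = len(array)
--     ans = 0
--     for l in range(n):
--         for r in range(l + 2, n):
--             seen = set()
--             hit = False
--             for j in range(l, r):
--                 if 2 * array[j] - array[r] in seen:
--                     hit = True
--                     break
--                 seen.add(array[j])
--             if hit:
--                 ans += n - r
--                 break
--     return ans
-- ===== Notes on version B (the rewrite author's own statement) =====
-- stated objective: faster
-- what changed: Instead of re-scanning all triples (i,j,k) in the window with four nested loops for each (l,r), B detects a 3-term AP whose last element is array[r] in one pass over j using a set of earlier values (array[i] == 2*array[j]-array[r]), which suffices because the first window containing any AP triple contains one ending at its right edge.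
import Mathlib
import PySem

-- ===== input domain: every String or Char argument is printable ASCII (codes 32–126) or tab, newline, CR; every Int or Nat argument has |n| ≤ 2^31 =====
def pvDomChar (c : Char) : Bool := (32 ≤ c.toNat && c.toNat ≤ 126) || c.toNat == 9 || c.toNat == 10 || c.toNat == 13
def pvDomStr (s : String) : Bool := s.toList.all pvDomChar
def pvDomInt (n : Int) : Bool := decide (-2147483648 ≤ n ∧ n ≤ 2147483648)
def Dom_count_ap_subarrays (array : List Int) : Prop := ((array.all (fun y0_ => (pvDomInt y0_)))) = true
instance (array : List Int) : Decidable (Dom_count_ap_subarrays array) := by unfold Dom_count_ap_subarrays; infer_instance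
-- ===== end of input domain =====

-- B replaces A's four nested triple-scanning loops per (l,r) by a single pass over j with a
-- set of earlier values (detecting a 3-term AP ending at the window's right edge): asymptotically faster.

-- ===== PORT A =====
-- the quadruple nested loop with the 'found' flag and breaks: found = any i, any j, any k
def pvA_found (a : List Int) (l r : Int) : Bool :=
  (PySem.List.pyRange l (r - 1) 1).any fun i =>
    (PySem.List.pyRange (i + 1) r 1).any fun j =>
      (PySem.List.pyRange (j + 1) (r + 1) 1).any fun k =>
        PySem.List.pyGetD a j 0 * 2 == PySem.List.pyGetD a i 0 + PySem.List.pyGetD a k 0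

-- 'for r in range(l+2, n): … if found: ans += n - r; break'
def pvA_rloop (a : List Int) (n l : Int) : List Int → Int
  | [] => 0
  | r :: rs => if pvA_found a l r then n - r else pvA_rloop a n l rs

def count_ap_subarrays (array : List Int) : Int :=
  let n : Int := array.length
  (PySem.List.pyRange 0 n 1).foldl
    (fun ans l => ans + pvA_rloop array n l (PySem.List.pyRange (l + 2) n 1)) 0

-- ===== PORT B =====
-- 'for j in range(l, r): if 2*array[j]-array[r] in seen: hit = True; break; seen.add(array[j])'
def pvB_jloop (a : List Int) (r : Int) (seen : PySem.Set Int) : List Int → Bool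
  | [] => false
  | j :: js =>
    if PySem.Set.contains seen (2 * PySem.List.pyGetD a j 0 - PySem.List.pyGetD a r 0) then true
    else pvB_jloop a r (PySem.Set.add seen (PySem.List.pyGetD a j 0)) js

def pvB_hit (a : List Int) (l r : Int) : Bool :=
  pvB_jloop a r PySem.Set.empty (PySem.List.pyRange l r 1)

-- 'for r in range(l+2, n): … if hit: ans += n - r; break'
def pvB_rloop (a : List Int) (n l : Int) : List Int → Int
  | [] => 0
  | r :: rs => if pvB_hit a l r then n - r else pvB_rloop a n l rs

-- 'for l in range(n): …' summing each l's contribution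
def pvB_main (a : List Int) (n : Int) : List Int → Int
  | [] => 0
  | l :: ls => pvB_rloop a n l (PySem.List.pyRange (l + 2) n 1) + pvB_main a n ls

def count_ap_subarrays_alt (array : List Int) : Int :=
  let n : Int := array.length
  pvB_main array n (PySem.List.pyRange 0 n 1)

-- ===== PRECONDITION & SPEC =====
def Spec_count_ap_subarrays (array : List Int) (out : Int) : Prop := out = count_ap_subarrays_alt array
instance (array : List Int) (out : Int) : Decidable (Spec_count_ap_subarrays array out) := by unfold Spec_count_ap_subarrays; infer_instance

-- ===== CLAIM (what is proved, stated in full; the proofs are below) =====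
def Claim_equal_count_ap_subarrays : Prop := ∀ (array : List Int), Dom_count_ap_subarrays array → Spec_count_ap_subarrays array (count_ap_subarrays array)

-- ===== LEMMAS AND PROOFS =====

-- A's 'found' flag holds iff the window [l, r] contains a 3-term AP subsequence.
lemma pvA_found_iff (a : List Int) (l r : Int) :
    pvA_found a l r = true ↔ ∃ i j k : Int, l ≤ i ∧ i < j ∧ j < k ∧ k ≤ r ∧
      PySem.List.pyGetD a j 0 * 2 = PySem.List.pyGetD a i 0 + PySem.List.pyGetD a k 0 := by
  simp only [pvA_found, List.any_eq_true, PySem.List.mem_pyRange_one, beq_iff_eq]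
  constructor
  · rintro ⟨i, ⟨hi1, hi2⟩, j, ⟨hj1, hj2⟩, k, ⟨hk1, hk2⟩, he⟩
    exact ⟨i, j, k, by omega, by omega, by omega, by omega, he⟩
  · rintro ⟨i, j, k, h1, h2, h3, h4, he⟩
    exact ⟨i, ⟨by omega, by omega⟩, j, ⟨by omega, by omega⟩, k, ⟨by omega, by omega⟩, he⟩

-- B's inner loop: with 'seen' holding exactly the values a[l..s), it finds a pair i < j with
-- j ≥ s completing an AP whose last element is a[r].
lemma pvB_jloop_iff (a : List Int) (r l : Int) :
    ∀ (s : Int) (seen : PySem.Set Int), l ≤ s →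
      (∀ x, seen.contains x = true ↔ ∃ i, l ≤ i ∧ i < s ∧ PySem.List.pyGetD a i 0 = x) →
      (pvB_jloop a r seen (PySem.List.pyRange s r 1) = true ↔
        ∃ i j, l ≤ i ∧ i < j ∧ s ≤ j ∧ j < r ∧
          2 * PySem.List.pyGetD a j 0 - PySem.List.pyGetD a r 0 = PySem.List.pyGetD a i 0) := by
  intro s seen hls hseen
  generalize hfuel : (r - s).toNat = fuel
  induction fuel generalizing s seen with
  | zero =>
    rw [PySem.List.pyRange_one_eq_nil (by omega)]
    constructor
    · intro h; simp [pvB_jloop] at h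
    · rintro ⟨i, j, _, _, h3, h4, _⟩; omega
  | succ f ih =>
    have hsr : s < r := by omega
    rw [PySem.List.pyRange_one_cons hsr]
    simp only [pvB_jloop]
    split_ifs with hc
    · simp only [true_iff]
      obtain ⟨i, hi1, hi2, hiv⟩ := (hseen _).mp hc
      exact ⟨i, s, hi1, by omega, by omega, hsr, hiv.symm⟩
    · rw [ih (s + 1) (PySem.Set.add seen (PySem.List.pyGetD a s 0)) (by omega) ?_ (by omega)]
      · constructor
        · rintro ⟨i, j, h1, h2, h3, h4, h5⟩
          exact ⟨i, j, h1, h2, by omega, h4, h5⟩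
        · rintro ⟨i, j, h1, h2, h3, h4, h5⟩
          rcases eq_or_lt_of_le h3 with hj | hj
          · exfalso
            apply hc
            apply (hseen _).mpr
            exact ⟨i, h1, by omega, by rw [← hj] at h5; omega⟩
          · exact ⟨i, j, h1, h2, by omega, h4, h5⟩
      · intro x
        rw [PySem.Set.contains_iff, PySem.Set.mem_add]
        constructor
        · rintro (hx | hx)
          · obtain ⟨i, h1, h2, h3⟩ := (hseen x).mp (by rwa [PySem.Set.contains_iff])
            exact ⟨i, h1, by omega, h3⟩
          · exact ⟨s, by omega, by omega, hx.symm⟩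
        · rintro ⟨i, h1, h2, h3⟩
          rcases eq_or_lt_of_le (by omega : i ≤ s) with hi | hi
          · right; rw [← h3, hi]
          · left
            rw [← PySem.Set.contains_iff]
            exact (hseen x).mpr ⟨i, h1, by omega, h3⟩

lemma pvB_hit_iff (a : List Int) (l r : Int) :
    pvB_hit a l r = true ↔ ∃ i j, l ≤ i ∧ i < j ∧ j < r ∧
      2 * PySem.List.pyGetD a j 0 - PySem.List.pyGetD a r 0 = PySem.List.pyGetD a i 0 := by
  rw [pvB_hit, pvB_jloop_iff a r l l PySem.Set.empty le_rfl]
  · constructor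
    · rintro ⟨i, j, h1, h2, h3, h4, h5⟩; exact ⟨i, j, h1, h2, h4, h5⟩
    · rintro ⟨i, j, h1, h2, h4, h5⟩; exact ⟨i, j, h1, h2, by omega, h4, h5⟩
  · intro x
    constructor
    · intro hx; simp [PySem.Set.empty] at hx
    · rintro ⟨i, h1, h2, _⟩; omega

-- A's flag at r holds iff B's single-pass test fired at some r' ≤ r.
lemma pvA_found_iff_hit (a : List Int) (l r : Int) :
    pvA_found a l r = true ↔ ∃ k, k ≤ r ∧ pvB_hit a l k = true := by
  rw [pvA_found_iff]
  constructor
  · rintro ⟨i, j, k, h1, h2, h3, h4, he⟩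
    exact ⟨k, h4, (pvB_hit_iff a l k).mpr ⟨i, j, h1, h2, h3, by omega⟩⟩
  · rintro ⟨k, hk, hh⟩
    obtain ⟨i, j, h1, h2, h3, he⟩ := (pvB_hit_iff a l k).mp hh
    exact ⟨i, j, k, h1, h2, h3, hk, by omega⟩

lemma pvB_hit_lb (a : List Int) (l r : Int) (h : pvB_hit a l r = true) : l + 2 ≤ r := by
  obtain ⟨i, j, h1, h2, h3, _⟩ := (pvB_hit_iff a l r).mp h
  omega

-- the two r-scans return the same contribution for each l
lemma rloop_eq (a : List Int) (n l : Int) :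
    ∀ s : Int, (∀ r', l + 2 ≤ r' → r' < s → pvB_hit a l r' = false) →
      pvA_rloop a n l (PySem.List.pyRange s n 1) = pvB_rloop a n l (PySem.List.pyRange s n 1) := by
  intro s hprev
  generalize hfuel : (n - s).toNat = fuel
  induction fuel generalizing s with
  | zero => rw [PySem.List.pyRange_one_eq_nil (by omega)]; rfl
  | succ f ih =>
    have hsn : s < n := by omega
    rw [PySem.List.pyRange_one_cons hsn]
    simp only [pvA_rloop, pvB_rloop]
    by_cases hh : pvB_hit a l s = true
    · rw [if_pos ((pvA_found_iff_hit a l s).mpr ⟨s, le_rfl, hh⟩), if_pos hh]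
    · have hf : pvA_found a l s = false := by
        rw [Bool.eq_false_iff]
        intro hfd
        obtain ⟨k, hk, hkh⟩ := (pvA_found_iff_hit a l s).mp hfd
        rcases eq_or_lt_of_le hk with hks | hks
        · exact hh (hks ▸ hkh)
        · rw [hprev k (pvB_hit_lb a l k hkh) hks] at hkh; exact Bool.false_ne_true hkh
      rw [if_neg (by simp [hf] : ¬ pvA_found a l s = true), if_neg hh]
      exact ih (s + 1)
        (fun r' h1 h2 => by
          rcases eq_or_lt_of_le (by omega : r' ≤ s) with h | h
          · rw [h]; exact Bool.eq_false_iff.mpr hh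
          · exact hprev r' h1 (by omega))
        (by omega)

lemma main_eq (a : List Int) (n : Int) :
    ∀ (ls : List Int) (acc : Int),
      ls.foldl (fun ans l => ans + pvA_rloop a n l (PySem.List.pyRange (l + 2) n 1)) acc
        = acc + pvB_main a n ls := by
  intro ls
  induction ls with
  | nil => intro acc; simp [pvB_main]
  | cons l ls ih =>
    intro acc
    simp only [List.foldl, pvB_main]
    rw [ih, rloop_eq a n l (l + 2) (fun r' h1 h2 => by omega)]
    omega

-- ===== VERDICT (by name: the statement is the Claim_ definition above) =====
theorem count_ap_subarrays_spec : Claim_equal_count_ap_subarrays := by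
  intro array _
  simp only [Spec_count_ap_subarrays, count_ap_subarrays, count_ap_subarrays_alt, main_eq,
    zero_add]
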